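-- pv_equiv track=rewrite | github.com/ahaspel/britannica-edition | src/britannica/pipeline/stages/transform_articles.py | _find_matching_double_braces
-- ===== SOURCE A (Python) =====
-- def _find_matching_double_braces(text: str, start: int) -> int:
--     """Given text[start:start+2] == '{{', return index just past the
--     matching '}}'. Returns -1 if not balanced within 5000 chars."""
--     if text[start:start + 2] != "{{":
--         return -1
--     depth = 0
--     i = start
--     end_search = min(len(text), start + 5000)
--     while i < end_search - 1:
--         ch2 = text[i:i + 2]
--         if ch2 == "{{":
--             depth += 1
--             i += 2
--         elif ch2 == "}}":
--             depth -= 1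
--             i += 2
--             if depth == 0:
--                 return i
--         else:
--             i += 1
--     return -1
-- ===== SOURCE B (Python) =====
-- def _find_matching_double_braces(text: str, start: int) -> int:
--     """Given text[start:start+2] == '{{', return index just past the
--     matching '}}'. Returns -1 if not balanced within 5000 chars."""
--     if text[start:start + 2] != "{{":
--         return -1
--     end_search = min(len(text), start + 5000)
--
--     def skip(i):
--         # text[i:i+2] == '{{': return index just past its matching '}}',
--         # handling nested templates by recursion; -1 if none in the window.
--         i += 2
--         while i < end_search - 1:
--             two = text[i:i + 2]
--             if two == "}}":
--                 return i + 2
--             if two == "{{":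
--                 i = skip(i)
--                 if i == -1:
--                     return -1
--             else:
--                 i += 1
--         return -1
--
--     return skip(start)
-- ===== Notes on version B (the rewrite author's own statement) =====
-- stated objective: alternative
-- what changed: Replaces A's single flat loop with an explicit depth counter by a recursive-descent helper skip(i) that, on meeting a nested '{{', recursively skips that whole nested template and resumes past it, so no depth variable exists at all; the matching '}}' is the first one met at the current recursion level.
-- outside the precondition, e.g. on _find_matching_double_braces('}}{{a{{aa}}}', -10): A returns 2, B returns -1
import Mathlib
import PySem

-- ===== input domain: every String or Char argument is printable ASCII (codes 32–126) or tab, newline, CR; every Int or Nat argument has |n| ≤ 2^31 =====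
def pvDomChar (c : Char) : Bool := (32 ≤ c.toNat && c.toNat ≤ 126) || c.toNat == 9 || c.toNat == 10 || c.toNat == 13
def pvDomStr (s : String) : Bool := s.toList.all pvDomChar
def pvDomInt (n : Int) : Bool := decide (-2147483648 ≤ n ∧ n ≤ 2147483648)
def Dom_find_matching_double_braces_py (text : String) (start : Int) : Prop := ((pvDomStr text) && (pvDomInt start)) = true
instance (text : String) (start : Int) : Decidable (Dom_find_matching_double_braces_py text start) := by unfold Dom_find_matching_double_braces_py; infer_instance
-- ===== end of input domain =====

-- B finds the matching '}}' by recursive descent (a nested '{{' is skipped by a recursive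
-- call, no depth counter exists); return-value equivalence on 0 ≤ start or guard failure.


-- ===== PORT A =====
-- while i < end_search - 1: step the cursor by 1 or 2 over two-char slices, tracking depth
-- fuel only makes the loop total: it never runs out before the loop's own exit (proved below)
def pvA_loop (L : List Char) (endSearch : Int) : Nat → Int → Int → Int
  | 0, _, _ => -1
  | fuel + 1, depth, i =>
    if i < endSearch - 1 then
      let ch2 := PySem.List.slice L (some i) (some (i + 2))
      if ch2 = ['{', '{'] then pvA_loop L endSearch fuel (depth + 1) (i + 2)
      else if ch2 = ['}', '}'] then
        if depth - 1 = 0 then i + 2 else pvA_loop L endSearch fuel (depth - 1) (i + 2)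
      else pvA_loop L endSearch fuel depth (i + 1)
    else -1

def find_matching_double_braces_py (text : String) (start : Int) : Int :=
  let L := text.toList
  if PySem.List.slice L (some start) (some (start + 2)) ≠ ['{', '{'] then -1
  else
    let endSearch := min (L.length : Int) (start + 5000)
    pvA_loop L endSearch (endSearch - start).toNat 0 start

-- ===== PORT B =====
-- skip's body (the while loop over the window suffix): returns the index just past the
-- matching '}}' together with the remaining window suffix at that index; a nested '{{'
-- is handled by the recursive call and scanning resumes on the suffix it returns.
-- fuel (= suffix length at the call) only makes the recursion total.
def pvBskip : Nat → List Char → Int → Option (Int × List Char)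
  | 0, _, _ => none
  | fuel + 1, w, i =>
    match w with
    | c1 :: c2 :: rest =>
      if c1 = '}' ∧ c2 = '}' then some (i + 2, rest)
      else if c1 = '{' ∧ c2 = '{' then
        match pvBskip fuel rest (i + 2) with
        | some (j, rest') => pvBskip fuel rest' j
        | none => none
      else pvBskip fuel (c2 :: rest) (i + 1)
    | _ => none

def find_matching_double_braces_py_alt (text : String) (start : Int) : Int :=
  let L := text.toList
  if PySem.List.slice L (some start) (some (start + 2)) ≠ ['{', '{'] then -1
  else
    let endSearch := min (L.length : Int) (start + 5000)
    -- skip(start): drop the leading '{{' of the window and scan for its close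
    match PySem.List.slice L (some start) (some endSearch) with
    | _ :: _ :: rest =>
      match pvBskip rest.length rest (start + 2) with
      | some (j, _) => j
      | none => -1
    | _ => -1

-- ===== PRECONDITION & SPEC =====
-- Pre_ excludes only a negative start at which text[start:start+2] == '{{': there both programs'
-- results are accidents of Python's negative-index slicing (A keeps slicing with wrapped-around
-- negative indices, B's recursion does too but from start+2), a corner nobody would specify.
def Pre_find_matching_double_braces_py (text : String) (start : Int) : Prop :=
  0 ≤ start ∨ PySem.List.slice text.toList (some start) (some (start + 2)) ≠ ['{', '{']
instance (text : String) (start : Int) : Decidable (Pre_find_matching_double_braces_py text start) := by unfold Pre_find_matching_double_braces_py; infer_instance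

def pvWitness_find_matching_double_braces_py : String × Int := ("a{{b{{c}}d}}e", 1)

def Spec_find_matching_double_braces_py (text : String) (start : Int) (out : Int) : Prop := out = find_matching_double_braces_py_alt text start
instance (text : String) (start : Int) (out : Int) : Decidable (Spec_find_matching_double_braces_py text start out) := by unfold Spec_find_matching_double_braces_py; infer_instance

-- ===== CLAIM (what is proved, stated in full; the proofs are below) =====
def Claim_equal_find_matching_double_braces_py : Prop := ∀ (text : String) (start : Int), Dom_find_matching_double_braces_py text start → Pre_find_matching_double_braces_py text start → Spec_find_matching_double_braces_py text start (find_matching_double_braces_py text start)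

-- ===== LEMMAS AND PROOFS =====

-- A's depth-counting loop agrees with this direct recursion on the window's chars.
def pvGo : List Char → Int → Int → Option Int
  | c1 :: c2 :: rest, pos, depth =>
    if c1 = '{' ∧ c2 = '{' then pvGo rest (pos + 2) (depth + 1)
    else if c1 = '}' ∧ c2 = '}' then
      if depth - 1 = 0 then some (pos + 2) else pvGo rest (pos + 2) (depth - 1)
    else pvGo (c2 :: rest) (pos + 1) depth
  | _, _, _ => none

def pvOptD : Option Int → Int
  | some e => e
  | none => -1

lemma pvA_loop_eq_pvGo (L : List Char) (eN : Nat) (heN : eN ≤ L.length) :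
    ∀ (fuel i : Nat) (depth : Int), eN - i ≤ fuel →
      pvA_loop L (eN : Int) fuel depth (i : Int)
        = pvOptD (pvGo ((L.drop i).take (eN - i)) (i : Int) depth) := by
  intro fuel
  induction fuel with
  | zero =>
    intro i depth hk
    rw [pvA_loop]
    have : eN - i = 0 := by omega
    simp [this, pvGo, pvOptD]
  | succ fuel ih =>
    intro i depth hk
    by_cases h : i + 1 < eN
    · have hlen2 : 2 ≤ (L.drop i).length := by simp; omega
      match hd : L.drop i with
      | [] => rw [hd] at hlen2; simp at hlen2
      | [c] => rw [hd] at hlen2; simp at hlen2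
      | c1 :: c2 :: rest =>
        have hcast : (i : Int) + 2 = ((i + 2 : Nat) : Int) := by push_cast; ring
        have hslice : PySem.List.slice L (some (i : Int)) (some ((i : Int) + 2)) = [c1, c2] := by
          rw [hcast, PySem.List.slice_natCast, hd]
          simp
        have hdrop2 : L.drop (i + 2) = rest := by
          rw [← List.drop_drop, hd]; rfl
        have hdrop1 : L.drop (i + 1) = c2 :: rest := by
          rw [← List.drop_drop, hd]; rfl
        have hwin : (c1 :: c2 :: rest).take (eN - i) = c1 :: c2 :: rest.take (eN - i - 2) := by
          have : eN - i = (eN - i - 2) + 1 + 1 := by omega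
          rw [this]; rfl
        rw [pvA_loop, if_pos (show (i : Int) < (eN : Int) - 1 by omega), hwin, pvGo]
        simp only [hslice, List.cons.injEq, and_true]
        by_cases hbr : c1 = '{' ∧ c2 = '{'
        · rw [if_pos hbr, if_pos hbr, hcast, ih (i + 2) (depth + 1) (by omega), hdrop2,
            Nat.sub_add_eq]
        · by_cases hbr2 : c1 = '}' ∧ c2 = '}'
          · rw [if_neg hbr, if_neg hbr, if_pos hbr2, if_pos hbr2]
            by_cases hdep : depth - 1 = 0
            · rw [if_pos hdep, if_pos hdep]
              simp [pvOptD]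
            · rw [if_neg hdep, if_neg hdep, hcast, ih (i + 2) (depth - 1) (by omega), hdrop2,
                Nat.sub_add_eq]
          · rw [if_neg hbr, if_neg hbr, if_neg hbr2, if_neg hbr2]
            have hcast1 : (i : Int) + 1 = ((i + 1 : Nat) : Int) := by push_cast; ring
            rw [hcast1, ih (i + 1) depth (by omega), hdrop1]
            have heq : eN - (i + 1) = (eN - i - 2) + 1 := by omega
            rw [heq, List.take_succ_cons]
    · rw [pvA_loop, if_neg (show ¬((i : Int) < (eN : Int) - 1) by omega)]
      have hle : ((L.drop i).take (eN - i)).length ≤ 1 := by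
        simp; omega
      match hw : (L.drop i).take (eN - i) with
      | [] => simp [pvGo, pvOptD]
      | [c] => simp [pvGo, pvOptD]
      | a :: b :: t => rw [hw] at hle; simp at hle

-- a successful skip consumes at least its closing '}}'
lemma pvBskip_length {fuel : Nat} {w : List Char} {i j : Int} {r' : List Char}
    (h : pvBskip fuel w i = some (j, r')) : r'.length + 2 ≤ w.length := by
  induction fuel generalizing w i j r' with
  | zero => simp [pvBskip] at h
  | succ fuel ih =>
    match w with
    | [] => simp [pvBskip] at h
    | [c] => simp [pvBskip] at h
    | c1 :: c2 :: rest =>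
      rw [pvBskip] at h
      split_ifs at h with h1 h2
      · simp only [Option.some.injEq, Prod.mk.injEq] at h
        simp [← h.2]
      · cases hm : pvBskip fuel rest (i + 2) with
        | none => rw [hm] at h; simp at h
        | some p =>
          rw [hm] at h
          have h1 := ih hm
          have h2 := ih h
          simp only [List.length_cons]
          omega
      · have := ih h
        simp only [List.length_cons] at this ⊢
        omega

-- depth-counter scanning = recursive descent: closing d nested levels equals one skip
-- followed by the scan at depth d - 1 on the suffix it returns.
lemma pvGo_eq_pvBskip (w : List Char) (i d : Int) (fuel : Nat)
    (hf : w.length ≤ fuel) (hd : 1 ≤ d) :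
    pvGo w i d = (match pvBskip fuel w i with
                  | none => none
                  | some (j, r') => if d = 1 then some j else pvGo r' j (d - 1)) := by
  induction hk : w.length using Nat.strong_induction_on generalizing w i d fuel with
  | _ k ih =>
  match w, fuel with
  | [], f => cases f <;> simp [pvGo, pvBskip]
  | [c], fuel + 1 => simp [pvGo, pvBskip]
  | c1 :: c2 :: rest, fuel + 1 =>
    rw [pvGo, pvBskip]
    by_cases hoo : c1 = '{' ∧ c2 = '{'
    · have hcc : ¬(c1 = '}' ∧ c2 = '}') := by
        rintro ⟨h1, _⟩; rw [hoo.1] at h1; exact absurd h1 (by decide)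
      rw [if_pos hoo, if_neg hcc, if_pos hoo]
      have hrest : rest.length ≤ fuel := by
        simp only [List.length_cons] at hf; omega
      rw [ih rest.length (by simp only [List.length_cons, ← hk]; omega) rest (i + 2) (d + 1)
        fuel hrest (by omega) rfl]
      cases hm : pvBskip fuel rest (i + 2) with
      | none => simp
      | some p =>
        obtain ⟨j, r'⟩ := p
        simp only []
        rw [if_neg (show ¬(d + 1 = 1) by omega)]
        have hlen := pvBskip_length hm
        have : d + 1 - 1 = d := by omega
        rw [this]
        exact ih r'.length (by simp only [List.length_cons, ← hk]; omega) r' j d fuel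
          (by omega) hd rfl
    · by_cases hcc : c1 = '}' ∧ c2 = '}'
      · rw [if_neg hoo, if_pos hcc, if_pos hcc]
        simp only []
        by_cases h1 : d = 1
        · rw [if_pos (show d - 1 = 0 by omega), if_pos h1]
        · rw [if_neg (show ¬(d - 1 = 0) by omega), if_neg h1]
      · rw [if_neg hoo, if_neg hcc, if_neg hcc, if_neg hoo]
        exact ih (c2 :: rest).length (by simp only [List.length_cons, ← hk]; omega)
          (c2 :: rest) (i + 1) d fuel (by simp only [List.length_cons] at hf ⊢; omega) hd rfl

-- ===== VERDICT (by name: the statement is the Claim_ definition above) =====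
theorem find_matching_double_braces_py_spec : Claim_equal_find_matching_double_braces_py := by
  intro text start hdom hpre
  unfold Spec_find_matching_double_braces_py
  unfold find_matching_double_braces_py find_matching_double_braces_py_alt
  simp only []
  set L := text.toList with hL
  by_cases hg : PySem.List.slice L (some start) (some (start + 2)) ≠ ['{', '{']
  · rw [if_pos hg, if_pos hg]
  · rw [if_neg hg, if_neg hg]
    rw [not_not] at hg
    have hstart : 0 ≤ start := hpre.resolve_right (fun hne => hne hg)
    obtain ⟨s, rfl⟩ : ∃ s : Nat, start = (s : Int) := ⟨start.toNat, by omega⟩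
    have hcast : (s : Int) + 2 = ((s + 2 : Nat) : Int) := by push_cast; ring
    rw [hcast, PySem.List.slice_natCast] at hg
    have hlen : s + 2 ≤ L.length := by
      have := congrArg List.length hg
      simp at this
      omega
    set eN : Nat := min L.length (s + 5000) with heNdef
    have heInt : min (L.length : Int) ((s : Int) + 5000) = (eN : Int) := by
      rw [heNdef]; push_cast; omega
    have heN : eN ≤ L.length := by omega
    have hs2 : s + 2 ≤ eN := by omega
    rw [heInt]
    have hwin : PySem.List.slice L (some (s : Int)) (some (eN : Int))
        = (L.drop s).take (eN - s) := PySem.List.slice_natCast L s eN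
    have hdl : 2 ≤ (L.drop s).length := by simp; omega
    match hd : L.drop s with
    | [] => rw [hd] at hdl; simp at hdl
    | [c] => rw [hd] at hdl; simp at hdl
    | c1 :: c2 :: rest =>
      have hbraces : c1 = '{' ∧ c2 = '{' := by
        rw [hd] at hg
        simp at hg
        exact ⟨hg.1, hg.2⟩
      obtain ⟨rfl, rfl⟩ := hbraces
      have hW : (L.drop s).take (eN - s) = '{' :: '{' :: rest.take (eN - s - 2) := by
        rw [hd]
        have : eN - s = (eN - s - 2) + 1 + 1 := by omega
        rw [this]; rfl
      -- A side: the loop is pvGo on the window from depth 0; first step opens to depth 1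
      have hfuel : ((eN : Int) - (s : Int)).toNat = eN - s := by omega
      rw [hfuel, pvA_loop_eq_pvGo L eN heN (eN - s) s 0 (le_refl _), hW]
      rw [pvGo, if_pos (⟨rfl, rfl⟩ : '{' = '{' ∧ '{' = '{')]
      -- B side: skip(start) on the window tail
      rw [hwin, hW]
      simp only []
      -- both sides: recursive descent = depth-1 scan on the tail
      rw [pvGo_eq_pvBskip (rest.take (eN - s - 2)) ((s : Int) + 2) (0 + 1)
        (rest.take (eN - s - 2)).length (le_refl _) (by omega)]
      cases pvBskip (rest.take (eN - s - 2)).length (rest.take (eN - s - 2)) ((s : Int) + 2) with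
      | none => simp [pvOptD]
      | some p => obtain ⟨j, r'⟩ := p; simp [pvOptD]
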